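-- pv_equiv track=rewrite | github.com/jjburton/cgmTools | cgm/core/lib/zoo/names.py | matchCase
-- ===== SOURCE A (Python) =====
-- def matchCase( theStr, caseToMatch ):
-- 	matchedCase = []
-- 	lastCaseWasLower = True
-- 	for charA,charB in zip(theStr,caseToMatch):
-- 		lastCaseWasLower = charB.islower()
-- 		a = (charA.upper(), charA.lower()) [ lastCaseWasLower ]
-- 		matchedCase.append(a)
--
-- 	lenA, lenB = len(theStr), len(caseToMatch)
-- 	if lenA > lenB:
-- 		remainder = theStr[lenB:]
-- 		if lastCaseWasLower: remainder = remainder.lower()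
-- 		matchedCase.extend( remainder )
--
-- 	return ''.join( matchedCase )
-- ===== SOURCE B (Python) =====
-- def matchCase(theStr, caseToMatch):
--     lenB = len(caseToMatch)
--     trailing = caseToMatch[-1].islower() if caseToMatch else True
--     out = []
--     for i, ch in enumerate(theStr):
--         if i < lenB:
--             out.append(ch.lower() if caseToMatch[i].islower() else ch.upper())
--         else:
--             out.append(ch.lower() if trailing else ch)
--     return ''.join(out)
-- ===== Notes on version B (the rewrite author's own statement) =====
-- stated objective: simpler
-- what changed: Replaces A's zip-loop with mutable last-case state plus a separate remainder slice/extend by a single indexed pass over theStr that precomputes len(caseToMatch) and the trailing-case flag once and selects the casing per index.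
import Mathlib
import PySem

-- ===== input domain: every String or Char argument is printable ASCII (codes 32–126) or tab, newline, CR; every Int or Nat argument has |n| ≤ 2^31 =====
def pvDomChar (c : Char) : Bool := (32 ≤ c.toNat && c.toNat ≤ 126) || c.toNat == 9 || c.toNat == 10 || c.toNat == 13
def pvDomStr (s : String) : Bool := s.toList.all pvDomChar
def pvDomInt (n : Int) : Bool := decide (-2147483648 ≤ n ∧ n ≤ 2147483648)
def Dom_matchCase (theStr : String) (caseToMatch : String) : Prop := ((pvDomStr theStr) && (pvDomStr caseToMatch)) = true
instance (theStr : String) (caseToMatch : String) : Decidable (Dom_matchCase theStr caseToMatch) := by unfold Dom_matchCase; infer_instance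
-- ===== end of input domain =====

-- B replaces A's zip-loop plus separate remainder slice with one unified indexed
-- pass over theStr using a precomputed trailing-case flag (objective: simpler).

-- ===== PORT A =====
-- the zip loop: state = (collected chars, lastCaseWasLower)
def matchCaseLoop (as bs : List Char) (fl : Bool) : List Char × Bool :=
  match as, bs with
  | a :: as', b :: bs' =>
      let fl' := PySem.Chars.islower b
      let x := if fl' then PySem.Chars.lowerChar a else PySem.Chars.upperChar a
      let rest := matchCaseLoop as' bs' fl'
      (x :: rest.1, rest.2)
  | _, _ => ([], fl)

def matchCase (theStr : String) (caseToMatch : String) : String :=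
  let A := theStr.toList
  let B := caseToMatch.toList
  let r := matchCaseLoop A B true
  if A.length > B.length then
    -- theStr[lenB:] with 0 ≤ lenB is exactly List.drop lenB
    let remainder := A.drop B.length
    String.mk (r.1 ++ (if r.2 then PySem.Chars.lower remainder else remainder))
  else
    String.mk r.1

-- ===== PORT B =====
def matchCase_alt (theStr : String) (caseToMatch : String) : String :=
  let B := caseToMatch.toList
  let lenB := B.length
  let trailing := match B.getLast? with
    | some c => PySem.Chars.islower c
    | none => true
  String.mk ((PySem.List.enumerate theStr.toList).map (fun p =>
    if p.1 < (lenB : Int) then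
      if PySem.Chars.islower (PySem.List.pyGetD B p.1 ' ') then PySem.Chars.lowerChar p.2
      else PySem.Chars.upperChar p.2
    else
      if trailing then PySem.Chars.lowerChar p.2 else p.2))

-- ===== PRECONDITION & SPEC =====
def Spec_matchCase (theStr : String) (caseToMatch : String) (out : String) : Prop := out = matchCase_alt theStr caseToMatch
instance (theStr : String) (caseToMatch : String) (out : String) : Decidable (Spec_matchCase theStr caseToMatch out) := by unfold Spec_matchCase; infer_instance

-- ===== CLAIM (what is proved, stated in full; the proofs are below) =====
def Claim_equal_matchCase : Prop := ∀ (theStr : String) (caseToMatch : String), Dom_matchCase theStr caseToMatch → Spec_matchCase theStr caseToMatch (matchCase theStr caseToMatch)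

-- ===== LEMMAS AND PROOFS =====

-- the loop's collected characters are a zipWith
lemma matchCaseLoop_fst (as bs : List Char) (fl : Bool) :
    (matchCaseLoop as bs fl).1 =
      List.zipWith (fun a b => if PySem.Chars.islower b then PySem.Chars.lowerChar a
                               else PySem.Chars.upperChar a) as bs := by
  induction as generalizing bs fl with
  | nil => cases bs <;> simp [matchCaseLoop]
  | cons a as ih => cases bs <;> simp [matchCaseLoop, ih]

-- when theStr is at least as long as caseToMatch, the final flag is the
-- islower of caseToMatch's last character (or the initial flag if empty)
lemma matchCaseLoop_snd (as bs : List Char) (fl : Bool) (h : bs.length ≤ as.length) :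
    (matchCaseLoop as bs fl).2 =
      (match bs.getLast? with
       | some c => PySem.Chars.islower c
       | none => fl) := by
  induction bs generalizing as fl with
  | nil => cases as <;> simp [matchCaseLoop]
  | cons b bs ih =>
      cases as with
      | nil => simp at h
      | cons a as =>
          simp only [List.length_cons, Nat.add_le_add_iff_right] at h
          simp only [matchCaseLoop, ih as _ h]
          cases bs with
          | nil => simp
          | cons c cs =>
              rcases hgl : (c :: cs).getLast? with _ | d
              · simp at hgl
              · simp [hgl]

lemma zipWith_take_left (g : Char → Char → Char) (as bs : List Char) :
    List.zipWith g (as.take bs.length) bs = List.zipWith g as bs := by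
  induction bs generalizing as with
  | nil => simp
  | cons b bs ih => cases as <;> simp [ih]

lemma map_snd_comp (xs : List Char) (s : Int) (g : Char → Char) :
    (PySem.List.enumerate xs s).map (fun p => g p.2) = xs.map g := by
  rw [show (fun p : Int × Char => g p.2) = g ∘ (·.2) from rfl, ← List.map_map,
    PySem.List.map_snd_enumerate]

-- on indices below bs.length, B's branch computes exactly A's zipWith body
lemma zip_region (as bs : List Char) (trailing : Bool) (h : as.length ≤ bs.length) :
    (PySem.List.enumerate as).map (fun p =>
      if p.1 < (bs.length : Int) then
        if PySem.Chars.islower (PySem.List.pyGetD bs p.1 ' ') then PySem.Chars.lowerChar p.2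
        else PySem.Chars.upperChar p.2
      else
        if trailing then PySem.Chars.lowerChar p.2 else p.2) =
    List.zipWith (fun a b => if PySem.Chars.islower b then PySem.Chars.lowerChar a
                             else PySem.Chars.upperChar a) as bs := by
  apply List.ext_getElem
  · simp; omega
  · intro k hk1 hk2
    simp only [List.length_map, PySem.List.length_enumerate] at hk1
    have hkb : k < bs.length := by omega
    simp only [List.getElem_map, List.getElem_zipWith, PySem.List.getElem_enumerate]
    have hlt : ((0 : Int) + k) < (bs.length : Int) := by omega
    rw [if_pos hlt]
    have hget : PySem.List.pyGetD bs ((0 : Int) + k) ' ' = bs[k] := by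
      rw [Int.zero_add, PySem.List.pyGetD_natCast bs k ' ']
      simp [List.getD, hkb]
    rw [hget]

theorem matchCase_eq_alt (theStr caseToMatch : String) :
    matchCase theStr caseToMatch = matchCase_alt theStr caseToMatch := by
  unfold matchCase matchCase_alt
  set as := theStr.toList with has
  set bs := caseToMatch.toList with hbs
  simp only [matchCaseLoop_fst]
  by_cases hlen : bs.length < as.length
  · rw [if_pos hlen]
    refine congrArg String.mk ?_
    conv_rhs => rw [← List.take_append_drop bs.length as, PySem.List.enumerate_append,
      List.map_append]
    have htk : (as.take bs.length).length = bs.length := by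
      simp [List.length_take, Nat.le_of_lt hlen]
    rw [htk]
    simp only [Int.zero_add]
    congr 1
    · rw [zip_region _ bs _ (le_of_eq htk), zipWith_take_left]
    · -- remainder region: every index is ≥ bs.length, so B takes the trailing branch
      have hge : ∀ p ∈ PySem.List.enumerate (as.drop bs.length) (bs.length : Int),
          ¬ (p.1 < (bs.length : Int)) := by
        intro p hp
        rcases (PySem.List.mem_enumerate_iff _ _ p).1 hp with ⟨k, hk, rfl⟩
        push_cast; omega
      rw [List.map_congr_left (fun p hp => if_neg (hge p hp))]
      rw [matchCaseLoop_snd as bs true (Nat.le_of_lt hlen)]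
      rcases hgl : bs.getLast? with _ | c
      · simp only [if_pos]
        rw [map_snd_comp]
        rfl
      · 
        by_cases hc : PySem.Chars.islower c
        · simp [hc, map_snd_comp, PySem.Chars.lower]
        · simp only [hc, if_neg, Bool.false_eq_true, not_false_iff]
          rw [show (fun p : Int × Char => p.2) = (fun p : Int × Char => id p.2) from rfl,
            map_snd_comp, List.map_id]
  · rw [if_neg (by omega)]
    refine congrArg String.mk ?_
    rw [zip_region as bs _ (by omega)]

-- ===== VERDICT (by name: the statement is the Claim_ definition above) =====
theorem matchCase_spec : Claim_equal_matchCase := by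
  intro theStr caseToMatch _
  exact matchCase_eq_alt theStr caseToMatch
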